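-- pv_equiv track=rewrite | github.com/taosdata/TDengine | tools/tdgpt/taosanalytics/util.py | convert_results_to_windows
-- ===== SOURCE A (Python) =====
-- def convert_results_to_windows(result, ts_list, valid_code):
--     """generate the window according to anomaly detection result"""
--     skey, ekey = -1, -1
--     wins = []
--
--     if ts_list is None or result is None or len(result) != len(ts_list):
--         return wins
--
--     for index, val in enumerate(result):
--         if val != valid_code:
--             ekey = ts_list[index]
--             if skey == -1:
--                 skey = ts_list[index]
--         else:
--             if ekey != -1:
--                 wins.append([skey, ekey])
--                 skey, ekey = -1, -1
--
--     if ekey != -1: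
--         wins.append([skey, ekey])
--
--     return wins
-- ===== SOURCE B (Python) =====
-- def convert_results_to_windows(result, ts_list, valid_code):
--     """generate the window according to anomaly detection result"""
--     if ts_list is None or result is None or len(result) != len(ts_list):
--         return []
--     wins = []
--     i, n = 0, len(result)
--     while i < n:
--         if result[i] != valid_code:
--             j = i
--             while j + 1 < n and result[j + 1] != valid_code:
--                 j += 1
--             wins.append([ts_list[i], ts_list[j]])
--             i = j + 1
--         else:
--             i += 1
--     return wins
-- ===== Notes on version B (the rewrite author's own statement) =====
-- stated objective: simpler
-- what changed: Replaced A's skey/ekey sentinel state machine (with a trailing flush) by a two-pointer scan that finds each maximal run of non-valid codes and emits its window in one step.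
-- intended difference: On inputs where some anomaly position at the start or end of a run of anomalies has timestamp -1, A's -1 sentinel misreads the state and drops, merges or shifts windows (e.g. result=[1], ts=[-1], valid=0: A returns [], B returns [[-1,-1]]); B returns the true windows, which is the intended behaviour. — e.g. on convert_results_to_windows(some [1], some [-1], 0): A returns [], B returns [[-1, -1]]
import Mathlib
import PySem

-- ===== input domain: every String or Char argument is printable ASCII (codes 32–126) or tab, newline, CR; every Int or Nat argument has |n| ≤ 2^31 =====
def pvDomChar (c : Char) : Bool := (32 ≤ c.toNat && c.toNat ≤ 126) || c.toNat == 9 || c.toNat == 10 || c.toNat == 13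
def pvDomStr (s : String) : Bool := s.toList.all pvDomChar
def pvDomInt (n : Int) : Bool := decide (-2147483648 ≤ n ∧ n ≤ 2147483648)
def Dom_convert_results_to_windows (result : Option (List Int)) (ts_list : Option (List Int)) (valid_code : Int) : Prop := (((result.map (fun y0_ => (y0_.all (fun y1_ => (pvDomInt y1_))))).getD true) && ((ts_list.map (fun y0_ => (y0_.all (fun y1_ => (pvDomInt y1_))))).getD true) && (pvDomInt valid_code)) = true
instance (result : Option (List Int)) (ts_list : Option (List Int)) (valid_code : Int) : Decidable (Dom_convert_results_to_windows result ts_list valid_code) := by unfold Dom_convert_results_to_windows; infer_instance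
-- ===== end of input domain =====

-- B replaces A's skey/ekey sentinel state machine with a two-pointer run scanner (objective: simpler);
-- on timestamps equal to the sentinel -1 at a run boundary A's windows are wrong and B's are intended (see D_ below).

-- ===== PORT A =====
-- the body of A's for-loop, on state (skey, ekey, wins) and the enumerate pair (index, val)
def pvStepA (t : List Int) (valid_code : Int) (s : Int × Int × List (List Int)) (p : Int × Int) : Int × Int × List (List Int) :=
  if p.2 ≠ valid_code then
    -- ts_list[index]: index is 0 ≤ index < len(ts_list) here, so pyGetD is exact
    ((if s.1 = -1 then PySem.List.pyGetD t p.1 0 else s.1), PySem.List.pyGetD t p.1 0, s.2.2)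
  else
    if s.2.1 ≠ -1 then (-1, -1, s.2.2 ++ [[s.1, s.2.1]]) else s

def convert_results_to_windows (result : Option (List Int)) (ts_list : Option (List Int)) (valid_code : Int) : List (List Int) :=
  match ts_list, result with
  | some t, some r =>
    if r.length ≠ t.length then [] else
      let st := (PySem.List.enumerate r 0).foldl (pvStepA t valid_code) (-1, -1, [])
      if st.2.1 ≠ -1 then st.2.2 ++ [[st.1, st.2.1]] else st.2.2
  | _, _ => []

-- ===== PORT B =====
-- inner while of Source B: extend j to the end of the run of values ≠ valid_code
-- (fuel makes the loop total; fuel = n always suffices since j < n grows each step)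
def pvRunEnd (r : List Int) (valid_code : Int) (n j fuel : Nat) : Nat :=
  match fuel with
  | 0 => j
  | fuel + 1 =>
    if j + 1 < n ∧ r.getD (j+1) 0 ≠ valid_code then pvRunEnd r valid_code n (j+1) fuel else j

-- outer while of Source B (fuel = n suffices: i advances each step; indices stay in range, so
-- List.getD is exact for the Python indexing; j := pvRunEnd … is Source B's inner while, inlined)
def pvScan (r t : List Int) (valid_code : Int) (n i fuel : Nat) (wins : List (List Int)) : List (List Int) :=
  match fuel with
  | 0 => wins
  | fuel + 1 =>
    if i < n then
      if r.getD i 0 ≠ valid_code then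
        pvScan r t valid_code n (pvRunEnd r valid_code n i n + 1) fuel
          (wins ++ [[t.getD i 0, t.getD (pvRunEnd r valid_code n i n) 0]])
      else pvScan r t valid_code n (i+1) fuel wins
    else wins

def convert_results_to_windows_alt (result : Option (List Int)) (ts_list : Option (List Int)) (valid_code : Int) : List (List Int) :=
  -- Source B's single guard line: None / None / length mismatch → []
  if ts_list.isNone ∨ result.isNone ∨ (result.getD []).length ≠ (ts_list.getD []).length then []
  else pvScan (result.getD []) (ts_list.getD []) valid_code (result.getD []).length 0 (result.getD []).length []

-- ===== PRECONDITION & SPEC =====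
-- On inputs where some anomaly position at the start or the end of a run of anomalies carries the
-- timestamp -1, A's use of -1 as an "empty" sentinel drops, merges or shifts windows, while B
-- returns the true windows; B's value is the intended one.
def D_convert_results_to_windows (result : Option (List Int)) (ts_list : Option (List Int)) (valid_code : Int) : Prop :=
  let r := result.getD []
  let t := ts_list.getD []
  r.length = t.length ∧ ∃ i < r.length, r.getD i 0 ≠ valid_code ∧ t.getD i 0 = -1 ∧
    (i = 0 ∨ r.getD (i-1) 0 = valid_code ∨ r.getD (i+1) valid_code = valid_code)

instance (result : Option (List Int)) (ts_list : Option (List Int)) (valid_code : Int) : Decidable (D_convert_results_to_windows result ts_list valid_code) := by unfold D_convert_results_to_windows; infer_instance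

def Spec_convert_results_to_windows (result : Option (List Int)) (ts_list : Option (List Int)) (valid_code : Int) (out : List (List Int)) : Prop := ¬ D_convert_results_to_windows result ts_list valid_code → out = convert_results_to_windows_alt result ts_list valid_code
instance (result : Option (List Int)) (ts_list : Option (List Int)) (valid_code : Int) (out : List (List Int)) : Decidable (Spec_convert_results_to_windows result ts_list valid_code out) := by unfold Spec_convert_results_to_windows; infer_instance

def pvDiffWitness_convert_results_to_windows : Option (List Int) × Option (List Int) × Int := (some [1], some [-1], 0)
def pvDiffWitnessOut_convert_results_to_windows : (List (List Int)) × (List (List Int)) := ([], [[-1, -1]])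

-- ===== CLAIM (what is proved, stated in full; the proofs are below) =====
def Claim_unchanged_convert_results_to_windows : Prop := ∀ (result : Option (List Int)) (ts_list : Option (List Int)) (valid_code : Int), Dom_convert_results_to_windows result ts_list valid_code → Spec_convert_results_to_windows result ts_list valid_code (convert_results_to_windows result ts_list valid_code)
def Claim_changed_convert_results_to_windows : Prop := Dom_convert_results_to_windows (pvDiffWitness_convert_results_to_windows.1) (pvDiffWitness_convert_results_to_windows.2.1) (pvDiffWitness_convert_results_to_windows.2.2) ∧ D_convert_results_to_windows (pvDiffWitness_convert_results_to_windows.1) (pvDiffWitness_convert_results_to_windows.2.1) (pvDiffWitness_convert_results_to_windows.2.2) ∧ convert_results_to_windows (pvDiffWitness_convert_results_to_windows.1) (pvDiffWitness_convert_results_to_windows.2.1) (pvDiffWitness_convert_results_to_windows.2.2) = pvDiffWitnessOut_convert_results_to_windows.1 ∧ convert_results_to_windows_alt (pvDiffWitness_convert_results_to_windows.1) (pvDiffWitness_convert_results_to_windows.2.1) (pvDiffWitness_convert_results_to_windows.2.2) = pvDiffWitnessOut_convert_results_to_windows.2 ∧ pvDiffWitnessOut_convert_results_to_windows.1 ≠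 pvDiffWitnessOut_convert_results_to_windows.2
def Claim_exact_convert_results_to_windows : Prop := ∀ (result : Option (List Int)) (ts_list : Option (List Int)) (valid_code : Int), Dom_convert_results_to_windows result ts_list valid_code → D_convert_results_to_windows result ts_list valid_code → convert_results_to_windows result ts_list valid_code ≠ convert_results_to_windows_alt result ts_list valid_code

-- ===== LEMMAS AND PROOFS =====

-- the two branches of A's loop body, as rewrite rules
theorem pvStepA_anom (t : List Int) (valid_code : Int) (s : Int × Int × List (List Int))
    (idx v : Int) (hv : v ≠ valid_code) :
    pvStepA t valid_code s (idx, v)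
      = ((if s.1 = -1 then PySem.List.pyGetD t idx 0 else s.1), PySem.List.pyGetD t idx 0, s.2.2) := by
  simp [pvStepA, hv]

theorem pvStepA_valid (t : List Int) (valid_code : Int) (s : Int × Int × List (List Int))
    (idx v : Int) (hv : v = valid_code) :
    pvStepA t valid_code s (idx, v)
      = if s.2.1 ≠ -1 then (-1, -1, s.2.2 ++ [[s.1, s.2.1]]) else s := by
  simp [pvStepA, hv]

-- A's fold, re-expressed as recursion on the index (proved equal to the foldl over enumerate below)
def pvFoldA (r t : List Int) (valid_code : Int) (i : Nat) (s : Int × Int × List (List Int)) : Int × Int × List (List Int) :=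
  if h : i < r.length then
    pvFoldA r t valid_code (i+1) (pvStepA t valid_code s ((i : Int), r[i]))
  else s
termination_by r.length - i
decreasing_by omega

theorem pvFoldA_eq_foldl (r t : List Int) (valid_code : Int) (i : Nat) (s : Int × Int × List (List Int)) :
    ((PySem.List.enumerate r 0).drop i).foldl (pvStepA t valid_code) s = pvFoldA r t valid_code i s := by
  unfold pvFoldA
  split
  · rename_i h
    have hlen : i < (PySem.List.enumerate r 0).length := by
      simpa [PySem.List.length_enumerate] using h
    rw [List.drop_eq_getElem_cons hlen]
    simp only [PySem.List.getElem_enumerate, List.foldl_cons, Int.zero_add]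
    exact pvFoldA_eq_foldl r t valid_code (i+1) (pvStepA t valid_code s ((i : Int), r[i]))
  · rename_i h
    have : (PySem.List.enumerate r 0).length ≤ i := by
      simp [PySem.List.length_enumerate]; omega
    rw [List.drop_of_length_le this]
    rfl
termination_by r.length - i
decreasing_by omega

theorem pvRunEnd_ge (r : List Int) (valid_code : Int) (n : Nat) :
    ∀ fuel j, j ≤ pvRunEnd r valid_code n j fuel := by
  intro fuel
  induction fuel with
  | zero => intro j; exact Nat.le_refl j
  | succ fuel ih =>
    intro j
    rw [pvRunEnd]
    split
    · exact Nat.le_trans (Nat.le_succ j) (ih (j+1))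
    · exact Nat.le_refl j

theorem pvRunEnd_lt (r : List Int) (valid_code : Int) (n : Nat) :
    ∀ fuel j, j < n → pvRunEnd r valid_code n j fuel < n := by
  intro fuel
  induction fuel with
  | zero => intro j h; exact h
  | succ fuel ih =>
    intro j h
    rw [pvRunEnd]
    split
    · rename_i hc; exact ih (j+1) hc.1
    · exact h

theorem pvRunEnd_run (r : List Int) (valid_code : Int) (n : Nat) :
    ∀ fuel j, r.getD j 0 ≠ valid_code →
    ∀ k, j ≤ k → k ≤ pvRunEnd r valid_code n j fuel → r.getD k 0 ≠ valid_code := by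
  intro fuel
  induction fuel with
  | zero =>
    intro j hj k hk1 hk2
    have : k = j := Nat.le_antisymm hk2 hk1
    simpa [this] using hj
  | succ fuel ih =>
    intro j hj k hk1 hk2
    rw [pvRunEnd] at hk2
    split at hk2
    · rename_i hc
      rcases Nat.eq_or_lt_of_le hk1 with rfl | hlt
      · exact hj
      · exact ih (j+1) hc.2 k hlt hk2
    · have : k = j := Nat.le_antisymm hk2 hk1
      simpa [this] using hj

theorem pvRunEnd_max (r : List Int) (valid_code : Int) (n : Nat) :
    ∀ fuel j, n ≤ j + 1 + fuel →
    pvRunEnd r valid_code n j fuel + 1 < n → r.getD (pvRunEnd r valid_code n j fuel + 1) 0 = valid_code := by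
  intro fuel
  induction fuel with
  | zero =>
    intro j hf h
    rw [pvRunEnd] at h
    omega
  | succ fuel ih =>
    intro j hf
    rw [pvRunEnd]
    split
    · exact ih (j+1) (by omega)
    · rename_i hc
      intro h
      by_contra hne
      exact hc ⟨h, hne⟩

-- the final append of A, applied to the fold's final state
def pvPostA (s : Int × Int × List (List Int)) : List (List Int) :=
  if s.2.1 ≠ -1 then s.2.2 ++ [[s.1, s.2.1]] else s.2.2

-- one anomaly step of A with skey already set to s0 ≠ -1
theorem pvRunStep (r t : List Int) (valid_code : Int) (j : Nat) (hj : j < r.length)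
    (s0 e : Int) (hs0 : s0 ≠ -1) (hv : r.getD j 0 ≠ valid_code) (wins : List (List Int)) :
    pvFoldA r t valid_code j (s0, e, wins) = pvFoldA r t valid_code (j+1) (s0, t.getD j 0, wins) := by
  conv_lhs => rw [pvFoldA]
  rw [dif_pos hj]
  congr 1
  have hr : r[j] = r.getD j 0 := (List.getD_eq_getElem r 0 hj).symm
  have hv' : r[j] ≠ valid_code := by rw [hr]; exact hv
  rw [pvStepA_anom t valid_code _ _ _ hv', if_neg hs0, PySem.List.pyGetD_natCast]

-- A over the whole run [k, j] with skey = s0 ≠ -1: ends at j+1 with ekey = t[j]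
theorem pvRunFoldA (r t : List Int) (valid_code : Int) (j : Nat) (hj : j < r.length)
    (k : Nat) (hk : k ≤ j) (hrun : ∀ m, k ≤ m → m ≤ j → r.getD m 0 ≠ valid_code)
    (s0 e : Int) (hs0 : s0 ≠ -1) (wins : List (List Int)) :
    pvFoldA r t valid_code k (s0, e, wins) = pvFoldA r t valid_code (j+1) (s0, t.getD j 0, wins) := by
  rcases Nat.eq_or_lt_of_le hk with rfl | hlt
  · exact pvRunStep r t valid_code k hj s0 e hs0 (hrun k (le_refl k) (le_refl k)) wins
  · have hkj : k < r.length := Nat.lt_of_le_of_lt hk hj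
    rw [pvRunStep r t valid_code k hkj s0 e hs0 (hrun k (le_refl k) hk) wins]
    exact pvRunFoldA r t valid_code j hj (k+1) hlt
      (fun m h1 h2 => hrun m (Nat.le_of_succ_le h1) h2) s0 (t.getD k 0) hs0 wins
termination_by j - k
decreasing_by omega

-- the central equivalence: outside D_, A's state machine from a "fresh" index equals B's run scanner
theorem pvMain (r t : List Int) (valid_code : Int) (hlen : r.length = t.length)
    (hD : ∀ i < r.length, r.getD i 0 ≠ valid_code → t.getD i 0 = -1 →
        ¬(i = 0 ∨ r.getD (i-1) 0 = valid_code ∨ i = r.length - 1 ∨ r.getD (i+1) 0 = valid_code))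
    (fuel i : Nat) (hfuel : r.length ≤ i + fuel)
    (hstart : i = 0 ∨ (0 < i ∧ r.getD (i-1) 0 = valid_code)) (wins : List (List Int)) :
    pvPostA (pvFoldA r t valid_code i (-1, -1, wins)) = pvScan r t valid_code r.length i fuel wins := by
  by_cases hi : i < r.length
  · have hfz : fuel ≠ 0 := by omega
    obtain ⟨fuel', rfl⟩ : ∃ f, fuel = f + 1 := ⟨fuel - 1, by omega⟩
    have hr : r[i] = r.getD i 0 := (List.getD_eq_getElem r 0 hi).symm
    by_cases hv : r.getD i 0 = valid_code
    · -- valid value: both just step to i+1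
      have hv' : r[i] = valid_code := hr.trans hv
      have hstep : pvStepA t valid_code (-1, -1, wins) ((i : Int), r[i]) = (-1, -1, wins) := by
        rw [pvStepA_valid t valid_code _ _ _ hv']; exact if_neg (fun h => h rfl)
      conv_lhs => rw [pvFoldA]
      rw [dif_pos hi, hstep]
      conv_rhs => rw [pvScan]
      rw [if_pos hi, if_neg (by simpa using hv)]
      exact pvMain r t valid_code hlen hD fuel' (i+1) (by omega)
        (Or.inr ⟨Nat.succ_pos i, by simpa using hv⟩) wins
    · -- anomaly run from i to j := pvRunEnd r valid_code r.length i r.length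
      have hv' : r[i] ≠ valid_code := by rw [hr]; exact hv
      have hij : i ≤ pvRunEnd r valid_code r.length i r.length :=
        pvRunEnd_ge r valid_code r.length r.length i
      have hjlt : pvRunEnd r valid_code r.length i r.length < r.length :=
        pvRunEnd_lt r valid_code r.length r.length i hi
      have hrun : ∀ m, i ≤ m → m ≤ pvRunEnd r valid_code r.length i r.length →
          r.getD m 0 ≠ valid_code :=
        pvRunEnd_run r valid_code r.length r.length i hv
      have hvj : r.getD (pvRunEnd r valid_code r.length i r.length) 0 ≠ valid_code :=
        hrun _ hij (le_refl _)
      -- boundary timestamps are not -1 (from ¬D_)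
      have hti : t.getD i 0 ≠ -1 := by
        intro hti
        apply hD i hi hv hti
        rcases hstart with h | ⟨h1, h2⟩
        · exact Or.inl h
        · exact Or.inr (Or.inl h2)
      have htj : t.getD (pvRunEnd r valid_code r.length i r.length) 0 ≠ -1 := by
        intro htj
        apply hD _ hjlt hvj htj
        by_cases hj1 : pvRunEnd r valid_code r.length i r.length + 1 < r.length
        · exact Or.inr (Or.inr (Or.inr
            (pvRunEnd_max r valid_code r.length r.length i (by omega) hj1)))
        · exact Or.inr (Or.inr (Or.inl (by omega)))
      -- A's first step of the run sets skey := ts[i]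
      have hstep : pvStepA t valid_code (-1, -1, wins) ((i : Int), r[i])
          = (t.getD i 0, t.getD i 0, wins) := by
        rw [pvStepA_anom t valid_code _ _ _ hv', if_pos rfl, PySem.List.pyGetD_natCast]
      conv_lhs => rw [pvFoldA]
      rw [dif_pos hi, hstep]
      -- drag ekey through the rest of the run
      have hA : pvFoldA r t valid_code (i+1) (t.getD i 0, t.getD i 0, wins)
          = pvFoldA r t valid_code (pvRunEnd r valid_code r.length i r.length + 1)
              (t.getD i 0, t.getD (pvRunEnd r valid_code r.length i r.length) 0, wins) := by
        rcases Nat.eq_or_lt_of_le hij with heq | hlt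
        · rw [← heq]
        · exact pvRunFoldA r t valid_code _ hjlt (i+1) hlt
            (fun m h1 h2 => hrun m (Nat.le_of_succ_le h1) h2) (t.getD i 0) (t.getD i 0) hti wins
      rw [hA]
      -- B consumes the run in one step
      conv_rhs => rw [pvScan]
      rw [if_pos hi, if_pos hv]
      by_cases hj1 : pvRunEnd r valid_code r.length i r.length + 1 < r.length
      · -- the run is closed by a valid value: A appends the window and resets
        have hvj1 : r.getD (pvRunEnd r valid_code r.length i r.length + 1) 0 = valid_code :=
          pvRunEnd_max r valid_code r.length r.length i (by omega) hj1
        have hr1 : r[pvRunEnd r valid_code r.length i r.length + 1] = valid_code :=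
          ((List.getD_eq_getElem r 0 hj1).symm).trans hvj1
        have hstep1 : pvStepA t valid_code
            (t.getD i 0, t.getD (pvRunEnd r valid_code r.length i r.length) 0, wins)
            (((pvRunEnd r valid_code r.length i r.length + 1 : Nat) : Int),
              r[pvRunEnd r valid_code r.length i r.length + 1])
            = (-1, -1, wins ++ [[t.getD i 0, t.getD (pvRunEnd r valid_code r.length i r.length) 0]]) := by
          rw [pvStepA_valid t valid_code _ _ _ hr1]; exact if_pos htj
        conv_lhs => rw [pvFoldA]
        rw [dif_pos hj1, hstep1]
        -- B's next step sees the closing valid value and moves past it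
        have hfz' : fuel' ≠ 0 := by omega
        obtain ⟨fuel'', rfl⟩ : ∃ f, fuel' = f + 1 := ⟨fuel' - 1, by omega⟩
        conv_rhs => rw [pvScan]
        rw [if_pos hj1, if_neg (by simpa using hvj1)]
        exact pvMain r t valid_code hlen hD fuel''
          (pvRunEnd r valid_code r.length i r.length + 2) (by omega)
          (Or.inr ⟨by omega, by simpa using hvj1⟩)
          (wins ++ [[t.getD i 0, t.getD (pvRunEnd r valid_code r.length i r.length) 0]])
      · -- the run reaches the end of the list: A's trailing append fires
        conv_lhs => rw [pvFoldA]
        rw [dif_neg hj1]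
        -- B's next step stops (fuel exhausted or index past the end): both yield the window list
        rcases Nat.eq_zero_or_pos fuel' with rfl | hpos
        · rw [pvScan]
          unfold pvPostA
          exact if_pos htj
        · obtain ⟨fuel'', rfl⟩ : ∃ f, fuel' = f + 1 := ⟨fuel' - 1, by omega⟩
          conv_rhs => rw [pvScan]
          rw [if_neg hj1]
          unfold pvPostA
          exact if_pos htj
  · -- i beyond the end: both return wins
    conv_lhs => rw [pvFoldA]
    rw [dif_neg hi]
    rcases Nat.eq_zero_or_pos fuel with rfl | hpos
    · rw [pvScan]
      unfold pvPostA
      exact if_neg (fun h => h rfl)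
    · obtain ⟨fuel', rfl⟩ : ∃ f, fuel = f + 1 := ⟨fuel - 1, by omega⟩
      conv_rhs => rw [pvScan]
      rw [if_neg hi]
      unfold pvPostA
      exact if_neg (fun h => h rfl)
termination_by fuel
decreasing_by
  · omega
  · omega

-- ===== TIGHTNESS: A ≠ B everywhere inside D_ =====

-- invariant of A's fold: ekey ≠ -1 forces skey ≠ -1, and no recorded window contains -1
theorem pvFoldA_inv (r t : List Int) (valid_code : Int) (i : Nat) (st : Int × Int × List (List Int))
    (h1 : st.2.1 ≠ -1 → st.1 ≠ -1) (h2 : ∀ w ∈ st.2.2, (-1 : Int) ∉ w) :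
    ((pvFoldA r t valid_code i st).2.1 ≠ -1 → (pvFoldA r t valid_code i st).1 ≠ -1) ∧
    (∀ w ∈ (pvFoldA r t valid_code i st).2.2, (-1 : Int) ∉ w) := by
  rw [pvFoldA]
  split
  · rename_i hi
    by_cases hv : r[i] = valid_code
    · rw [pvStepA_valid t valid_code _ _ _ hv]
      by_cases he : st.2.1 ≠ -1
      · rw [if_pos he]
        refine pvFoldA_inv r t valid_code (i+1) _ (fun h => absurd rfl h) ?_
        intro w hw
        rcases List.mem_append.mp hw with h | h
        · exact h2 w h
        · have hw' : w = [st.1, st.2.1] := by simpa using h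
          subst hw'
          intro hmem
          rcases (by simpa using hmem : (-1 : Int) = st.1 ∨ (-1 : Int) = st.2.1) with h | h
          · exact (h1 he) h.symm
          · exact he h.symm
      · rw [if_neg he]
        exact pvFoldA_inv r t valid_code (i+1) st h1 h2
    · rw [pvStepA_anom t valid_code _ _ _ hv]
      refine pvFoldA_inv r t valid_code (i+1) _ ?_ h2
      intro hne
      split
      · exact hne
      · rename_i hs; exact hs
  · exact ⟨h1, h2⟩
termination_by r.length - i
decreasing_by all_goals omega

-- hence: no window of A's output contains -1
theorem pvA_good (r t : List Int) (valid_code : Int) (hlen : r.length = t.length) :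
    ∀ w ∈ convert_results_to_windows (some r) (some t) valid_code, (-1 : Int) ∉ w := by
  unfold convert_results_to_windows
  dsimp only
  rw [if_neg (fun h => h hlen)]
  have hfold := pvFoldA_eq_foldl r t valid_code 0 (-1, -1, [])
  simp only [List.drop_zero] at hfold
  rw [hfold]
  have hinv := pvFoldA_inv r t valid_code 0 (-1, -1, [])
    (fun h => absurd rfl h) (by intro w hw; simp at hw)
  intro w hw
  split at hw
  · rename_i he
    rcases List.mem_append.mp hw with h | h
    · exact hinv.2 w h
    · have hw' : w = [(pvFoldA r t valid_code 0 (-1, -1, [])).1,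
          (pvFoldA r t valid_code 0 (-1, -1, [])).2.1] := by simpa using h
      subst hw'
      intro hmem
      rcases (by simpa using hmem :
          (-1 : Int) = (pvFoldA r t valid_code 0 (-1, -1, [])).1 ∨
          (-1 : Int) = (pvFoldA r t valid_code 0 (-1, -1, [])).2.1) with h | h
      · exact (hinv.1 he) h.symm
      · exact he h.symm
  · exact hinv.2 w hw

-- B's scanner keeps every window already in the accumulator
theorem pvScan_mem_mono (r t : List Int) (valid_code : Int) (n : Nat) :
    ∀ fuel i wins w, w ∈ wins → w ∈ pvScan r t valid_code n i fuel wins := by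
  intro fuel
  induction fuel with
  | zero => intro i wins w hw; exact hw
  | succ fuel ih =>
    intro i wins w hw
    rw [pvScan]
    split
    · split
      · exact ih _ _ w (List.mem_append_left _ hw)
      · exact ih _ _ w hw
    · exact hw

-- inside D_, B's output contains a window carrying the timestamp -1 of the bad run boundary
theorem pvScan_hits (r t : List Int) (valid_code : Int) (b : Nat) (hb : b < r.length)
    (hvb : r.getD b 0 ≠ valid_code) (htb : t.getD b 0 = -1)
    (hbd : b = 0 ∨ r.getD (b-1) 0 = valid_code ∨ r.getD (b+1) valid_code = valid_code)
    (fuel i : Nat) (hfuel : r.length ≤ i + fuel) (hib : i ≤ b) (wins : List (List Int)) :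
    ∃ w ∈ pvScan r t valid_code r.length i fuel wins, (-1 : Int) ∈ w := by
  have hi : i < r.length := Nat.lt_of_le_of_lt hib hb
  obtain ⟨fuel', rfl⟩ : ∃ f, fuel = f + 1 := ⟨fuel - 1, by omega⟩
  rw [pvScan, if_pos hi]
  by_cases hv : r.getD i 0 = valid_code
  · rw [if_neg (by simpa using hv)]
    have hib' : i + 1 ≤ b := by
      rcases Nat.eq_or_lt_of_le hib with rfl | h
      · exact absurd hv hvb
      · omega
    exact pvScan_hits r t valid_code b hb hvb htb hbd fuel' (i+1) (by omega) hib' wins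
  · rw [if_pos hv]
    have hij : i ≤ pvRunEnd r valid_code r.length i r.length :=
      pvRunEnd_ge r valid_code r.length r.length i
    have hjlt : pvRunEnd r valid_code r.length i r.length < r.length :=
      pvRunEnd_lt r valid_code r.length r.length i hi
    have hrun : ∀ m, i ≤ m → m ≤ pvRunEnd r valid_code r.length i r.length →
        r.getD m 0 ≠ valid_code :=
      pvRunEnd_run r valid_code r.length r.length i hv
    by_cases hbj : b ≤ pvRunEnd r valid_code r.length i r.length
    · -- the run [i, j] contains b, so one of the emitted window's ends is t[b] = -1
      refine ⟨[t.getD i 0, t.getD (pvRunEnd r valid_code r.length i r.length) 0],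
        pvScan_mem_mono r t valid_code r.length fuel' _ _ _
          (List.mem_append_right _ (by simp)), ?_⟩
      rcases hbd with h | h | h
      · -- b is the start of its run: b = i
        have hbi : b = i := by omega
        subst hbi
        simp
        exact Or.inl htb.symm
      · -- r[b-1] = valid_code: b = i (anything in (i, j] has an anomalous predecessor)
        have hbi : b = i := by
          by_contra hne
          have h1 : i ≤ b - 1 := by omega
          have h2 : b - 1 ≤ pvRunEnd r valid_code r.length i r.length := by omega
          exact hrun (b-1) h1 h2 h
        subst hbi
        simp
        exact Or.inl htb.symm
      · -- r[b+1] is valid (or past the end): b = j (the run cannot continue past b)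
        have hbj' : b = pvRunEnd r valid_code r.length i r.length := by
          by_contra hne
          have hlt : b + 1 ≤ pvRunEnd r valid_code r.length i r.length := by omega
          have hin : b + 1 < r.length := Nat.lt_of_le_of_lt hlt hjlt
          have := hrun (b+1) (by omega) hlt
          rw [List.getD_eq_getElem r 0 hin] at this
          rw [List.getD_eq_getElem r valid_code hin] at h
          exact this h
        rw [← hbj']
        simp
        exact Or.inr htb.symm
    · -- the run ends before b: continue at j+1 ≤ b
      exact pvScan_hits r t valid_code b hb hvb htb hbd fuel' _ (by omega) (by omega)
        (wins ++ [[t.getD i 0, t.getD (pvRunEnd r valid_code r.length i r.length) 0]])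
termination_by fuel
decreasing_by
  · omega
  · omega

-- ===== VERDICT (by name: the statement is the Claim_ definition above) =====
theorem convert_results_to_windows_spec : Claim_unchanged_convert_results_to_windows := by
  intro result ts_list valid_code _hdom hD
  match result, ts_list with
  | none, none => rfl
  | none, some t => rfl
  | some r, none => rfl
  | some r, some t =>
    unfold convert_results_to_windows convert_results_to_windows_alt
    dsimp only [Option.isNone, Option.getD]
    by_cases hlen : r.length = t.length
    · have hne : ¬(r.length ≠ t.length) := fun h => h hlen
      rw [if_neg hne, if_neg (show ¬(false = true ∨ false = true ∨ r.length ≠ t.length) by simp [hlen])]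
      have hD' : ∀ i < r.length, r.getD i 0 ≠ valid_code → t.getD i 0 = -1 →
          ¬(i = 0 ∨ r.getD (i-1) 0 = valid_code ∨ i = r.length - 1 ∨ r.getD (i+1) 0 = valid_code) := by
        intro i hi hv ht hb
        apply hD
        refine ⟨by simpa using hlen, ⟨i, by simpa using hi, by simpa using hv, by simpa using ht, ?_⟩⟩
        rcases hb with h | h | h | h
        · exact Or.inl h
        · exact Or.inr (Or.inl (by simpa using h))
        · refine Or.inr (Or.inr ?_)
          show (r.getD (i+1) valid_code) = valid_code
          rw [List.getD_eq_default]
          omega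
        · refine Or.inr (Or.inr ?_)
          by_cases hlt : i + 1 < r.length
          · show (r.getD (i+1) valid_code) = valid_code
            rw [List.getD_eq_getElem r valid_code hlt]
            rw [List.getD_eq_getElem r 0 hlt] at h
            exact h
          · show (r.getD (i+1) valid_code) = valid_code
            rw [List.getD_eq_default]
            omega

      have hfold := pvFoldA_eq_foldl r t valid_code 0 (-1, -1, [])
      simp only [List.drop_zero] at hfold
      have hmain := pvMain r t valid_code hlen hD' r.length 0 (by omega) (Or.inl rfl) []
      rw [← hfold] at hmain
      exact hmain
    · rw [if_pos hlen, if_pos (show (false = true ∨ false = true ∨ r.length ≠ t.length) from Or.inr (Or.inr hlen))]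
theorem convert_results_to_windows_changed : Claim_changed_convert_results_to_windows := by
  unfold Claim_changed_convert_results_to_windows
  decide

theorem convert_results_to_windows_tight : Claim_exact_convert_results_to_windows := by
  intro result ts_list valid_code _hdom hD
  obtain ⟨hlen, b, hb, hvb, htb, hbd⟩ := hD
  match result, ts_list with
  | none, _ =>
    simp at hb
  | some r, none =>
    have h0 : r.length = 0 := by simpa using hlen
    have hb' : b < r.length := by simpa using hb
    omega
  | some r, some t =>
    intro heq
    have hlen' : r.length = t.length := by simpa using hlen
    obtain ⟨w, hwB, hwneg⟩ := pvScan_hits r t valid_code b (by simpa using hb)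
      (by simpa using hvb) (by simpa using htb) (by simpa using hbd)
      r.length 0 (by omega) (by omega) []
    have hwB' : w ∈ convert_results_to_windows_alt (some r) (some t) valid_code := by
      unfold convert_results_to_windows_alt
      rw [if_neg (show ¬(((some t : Option (List Int)).isNone = true) ∨
        ((some r : Option (List Int)).isNone = true) ∨
        ((some r : Option (List Int)).getD []).length ≠ ((some t : Option (List Int)).getD []).length)
        by simp [hlen'])]
      exact hwB
    rw [← heq] at hwB'
    exact pvA_good r t valid_code hlen' w hwB' hwneg
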